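-- pv_equiv track=rewrite | github.com/alethiophile/ffmirror | server.py | make_pages
-- ===== SOURCE A (Python) =====
-- page_thres = 100
--
-- def make_pages(il):
--     cl = 0
--     ol = []
--     lc = 0
--     for n,i in enumerate(il):
--         cl += len(i[1])
--         if cl >= page_thres:
--             cl = 0
--             ol.append((lc, n+1))
--             lc = n+1
--     if len(ol) == 0 or ol[-1][1] != len(il):
--         ol.append((lc, len(il)))
--     return ol
-- ===== SOURCE B (Python) =====
-- page_thres = 100
--
-- def make_pages(il):
--     n = len(il)
--
--     def first_cut(pos):
--         # End index (exclusive) of the shortest page starting at pos whose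
--         # text reaches the threshold, or None if the rest stays under it.
--         tot = 0
--         k = pos
--         while k < n:
--             tot += len(il[k][1])
--             if tot >= page_thres:
--                 return k + 1
--             k += 1
--         return None
--
--     out = []
--     start = 0
--     while True:
--         cut = first_cut(start)
--         if cut is None or cut == n:
--             out.append((start, n))
--             return out
--         out.append((start, cut))
--         start = cut
-- ===== Notes on version B (the rewrite author's own statement) =====
-- stated objective: alternative
-- what changed: B works page-at-a-time: a helper scans forward from the current start until the cumulative text length reaches the threshold, one whole page is emitted per outer step and the scan restarts at the cut, instead of A's single enumerate loop threading cl/ol/lc accumulators and patching the last page afterwards.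
import Mathlib
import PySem

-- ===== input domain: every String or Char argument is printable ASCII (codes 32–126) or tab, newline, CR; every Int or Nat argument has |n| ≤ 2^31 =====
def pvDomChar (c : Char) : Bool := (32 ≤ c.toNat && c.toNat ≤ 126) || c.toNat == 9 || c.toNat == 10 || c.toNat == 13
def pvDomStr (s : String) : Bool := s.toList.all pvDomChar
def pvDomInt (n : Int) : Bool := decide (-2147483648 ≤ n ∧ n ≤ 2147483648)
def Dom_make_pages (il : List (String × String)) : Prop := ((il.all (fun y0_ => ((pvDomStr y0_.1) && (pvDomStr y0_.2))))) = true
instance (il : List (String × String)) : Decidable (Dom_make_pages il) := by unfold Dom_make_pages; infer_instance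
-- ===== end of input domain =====

-- B builds the page list recursively, one page at a time (an inner scan finds the first cut,
-- then recursion continues on the remainder), instead of A's single accumulator loop; objective: alternative (same cost).

-- ===== PORT A =====
def make_pages_step (s : Int × List (Int × Int) × Int) (ni : Int × (String × String)) :
    Int × List (Int × Int) × Int :=
  let cl := s.1 + PySem.Str.len ni.2.2
  if cl ≥ 100 then (0, s.2.1 ++ [(s.2.2, ni.1 + 1)], ni.1 + 1)
  else (cl, s.2.1, s.2.2)

def make_pages (il : List (String × String)) : List (Int × Int) :=
  let st := (PySem.List.enumerate il).foldl make_pages_step (0, [], 0)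
  let ol := st.2.1
  if ol.length = 0 ∨ (ol.getLastD (0, 0)).2 ≠ (il.length : Int) then
    ol ++ [(st.2.2, (il.length : Int))]
  else ol

-- ===== PORT B =====
-- first_cut's while-loop: scan the suffix, accumulating tot, index carried as k
def fcAux : List (String × String) → Int → Nat → Option Nat
  | [], _, _ => none
  | x :: rest, tot, k =>
      let tot' := tot + PySem.Str.len x.2
      if tot' ≥ 100 then some (k + 1) else fcAux rest tot' (k + 1)

-- termination facts for pagesFrom (cited by its decreasing_by)
lemma fcAux_lt {l : List (String × String)} {tot : Int} {k c : Nat}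
    (h : fcAux l tot k = some c) : k < c := by
  induction l generalizing tot k with
  | nil => simp [fcAux] at h
  | cons x rest ih =>
    simp only [fcAux] at h
    split at h
    · simp only [Option.some.injEq] at h; omega
    · exact Nat.lt_of_succ_lt (ih h)

lemma fcAux_le {l : List (String × String)} {tot : Int} {k c : Nat}
    (h : fcAux l tot k = some c) : c ≤ k + l.length := by
  induction l generalizing tot k with
  | nil => simp [fcAux] at h
  | cons x rest ih =>
    simp only [fcAux] at h
    split at h
    · simp only [Option.some.injEq] at h; simp [List.length_cons]; omega
    · have := ih h; simp [List.length_cons]; omega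

def pagesFrom (il : List (String × String)) (start : Nat) : List (Int × Int) :=
  match h : fcAux (il.drop start) 0 start with
  | none => [((start : Int), (il.length : Int))]
  | some cut =>
      if hc : cut = il.length then [((start : Int), (il.length : Int))]
      else ((start : Int), (cut : Int)) :: pagesFrom il cut
termination_by il.length - start
decreasing_by
  have h1 := fcAux_lt h
  have h2 := fcAux_le h
  have h3 : (il.drop start).length = il.length - start := by simp
  rcases Nat.lt_or_ge start il.length with hlt | hge
  · omega
  · rw [List.drop_eq_nil_of_le hge] at h; simp [fcAux] at h

def make_pages_alt (il : List (String × String)) : List (Int × Int) :=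
  pagesFrom il 0

-- ===== PRECONDITION & SPEC =====
def Spec_make_pages (il : List (String × String)) (out : List (Int × Int)) : Prop := out = make_pages_alt il
instance (il : List (String × String)) (out : List (Int × Int)) : Decidable (Spec_make_pages il out) := by unfold Spec_make_pages; infer_instance

-- ===== CLAIM (what is proved, stated in full; the proofs are below) =====
def Claim_equal_make_pages : Prop := ∀ (il : List (String × String)), Dom_make_pages il → Spec_make_pages il (make_pages il)

-- ===== LEMMAS AND PROOFS =====

-- A's fold applied to the suffix of il starting at `start`, followed by A's closing fix-up
def Afix (il : List (String × String)) (start : Nat) : List (Int × Int) :=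
  let st := (PySem.List.enumerate (il.drop start) (start : Int)).foldl make_pages_step
      (0, [], (start : Int))
  if st.2.1.length = 0 ∨ (st.2.1.getLastD (0, 0)).2 ≠ (il.length : Int) then
    st.2.1 ++ [(st.2.2, (il.length : Int))]
  else st.2.1

-- A's step only appends to the output list: the initial ol factors out
lemma prefix21 (L : List (Int × (String × String))) (cl : Int)
    (ol : List (Int × Int)) (lc : Int) :
    (L.foldl make_pages_step (cl, ol, lc)).2.1
      = ol ++ (L.foldl make_pages_step (cl, [], lc)).2.1 := by
  induction L generalizing cl ol lc with
  | nil => simp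
  | cons p t ih =>
    simp only [List.foldl_cons, make_pages_step]
    split_ifs with h
    · rw [ih _ (ol ++ [(lc, p.1 + 1)]), ih _ ([] ++ [(lc, p.1 + 1)])]
      simp
    · exact ih _ ol lc

lemma prefix22 (L : List (Int × (String × String))) (cl : Int)
    (ol : List (Int × Int)) (lc : Int) :
    (L.foldl make_pages_step (cl, ol, lc)).2.2
      = (L.foldl make_pages_step (cl, [], lc)).2.2 := by
  induction L generalizing cl ol lc with
  | nil => simp
  | cons p t ih =>
    simp only [List.foldl_cons, make_pages_step]
    split_ifs with h
    · rw [ih _ (ol ++ [(lc, p.1 + 1)]), ih _ ([] ++ [(lc, p.1 + 1)])]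
    · exact ih _ ol lc

-- if fcAux finds no cut, A's fold over the suffix emits nothing and keeps lc
lemma scan_none (l : List (String × String)) (tot : Int) (k : Nat) (lc : Int)
    (hn : fcAux l tot k = none) :
    ∃ t, (PySem.List.enumerate l (k : Int)).foldl make_pages_step (tot, [], lc) = (t, [], lc) := by
  induction l generalizing tot k with
  | nil => exact ⟨tot, by simp [PySem.List.enumerate_nil]⟩
  | cons x rest ih =>
    simp only [fcAux] at hn
    split at hn
    · exact absurd hn (by simp)
    · rename_i hc
      simp only [PySem.List.enumerate_cons, List.foldl_cons, make_pages_step]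
      rw [if_neg hc]
      have hcast : ((k : Int) + 1) = ((k + 1 : Nat) : Int) := by push_cast; ring
      rw [hcast]
      exact ih _ _ hn

-- if fcAux finds the first cut at c, A's fold over the suffix first emits (lc, c) and resets
lemma scan_some (l : List (String × String)) (tot : Int) (k c : Nat) (lc : Int)
    (hs : fcAux l tot k = some c) :
    (PySem.List.enumerate l (k : Int)).foldl make_pages_step (tot, [], lc)
      = (PySem.List.enumerate (l.drop (c - k)) (c : Int)).foldl make_pages_step
          (0, [(lc, (c : Int))], (c : Int)) := by
  induction l generalizing tot k with
  | nil => simp [fcAux] at hs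
  | cons x rest ih =>
    simp only [fcAux] at hs
    simp only [PySem.List.enumerate_cons, List.foldl_cons, make_pages_step]
    split at hs
    · rename_i hge
      simp only [Option.some.injEq] at hs
      subst hs
      rw [if_pos hge]
      have h2 : k + 1 - k = 1 := by omega
      rw [h2]
      simp only [Nat.cast_add, Nat.cast_one, List.drop_one, List.tail_cons, List.nil_append]
    · rename_i hc
      rw [if_neg hc]
      have hlt := fcAux_lt hs
      have hcast : ((k : Int) + 1) = ((k + 1 : Nat) : Int) := by push_cast; ring
      rw [hcast, ih _ _ hs]
      have hdr : (x :: rest).drop (c - k) = rest.drop (c - (k + 1)) := by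
        have hck : c - k = (c - (k + 1)) + 1 := by omega
        simp [hck]
      rw [hdr]

lemma getLastD_cons_ne_nil {α : Type} (a d : α) (l : List α) (h : l ≠ []) :
    (a :: l).getLastD d = l.getLastD d := by
  cases l with
  | nil => exact absurd rfl h
  | cons b t => rfl

lemma main_lemma (il : List (String × String)) :
    ∀ d start, il.length - start ≤ d → start ≤ il.length → Afix il start = pagesFrom il start := by
  intro d
  induction d with
  | zero =>
    intro start hd hle
    have hdrop : il.drop start = [] := List.drop_eq_nil_of_le (by omega)
    rw [pagesFrom.eq_def]
    split
    · simp only [Afix]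
      rw [hdrop]
      simp [PySem.List.enumerate_nil]
    · rename_i c heq
      rw [hdrop] at heq; simp [fcAux] at heq
  | succ e ih =>
    intro start hd hle
    rw [pagesFrom.eq_def]
    split
    · rename_i heq
      simp only [Afix]
      obtain ⟨t, ht⟩ := scan_none (il.drop start) 0 start (start : Int) heq
      rw [ht]
      simp
    · rename_i c heq
      have hlt := fcAux_lt heq
      have hle2 := fcAux_le heq
      have hdl : (il.drop start).length = il.length - start := by simp
      have hcn : c ≤ il.length := by omega
      simp only [Afix]
      rw [scan_some _ _ _ _ _ heq]
      have hdd : (il.drop start).drop (c - start) = il.drop c := by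
        rw [List.drop_drop]; congr 1; omega
      rw [hdd, prefix21, prefix22]
      by_cases hcend : c = il.length
      · have hnil : il.drop c = [] := List.drop_eq_nil_of_le (by omega)
        rw [dif_pos hcend, hnil]
        simp [PySem.List.enumerate_nil, hcend]
      · rw [dif_neg hcend]
        set r := (PySem.List.enumerate (il.drop c) (c : Int)).foldl make_pages_step
            (0, [], (c : Int)) with hr
        have hih : Afix il c = pagesFrom il c := ih c (by omega) hcn
        simp only [Afix] at hih
        rw [← hr] at hih
        simp only [List.singleton_append]
        have hcne : ((c : Int)) ≠ (il.length : Int) := by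
          simp only [ne_eq, Nat.cast_inj]; exact hcend
        rcases eq_or_ne r.2.1 ([] : List (Int × Int)) with hemp | hemp
        · rw [hemp] at hih ⊢
          split_ifs at hih with h1
          · split_ifs with h2
            · simp only [List.nil_append] at hih
              simp [← hih]
            · exact absurd (Or.inr (by simpa using hcne)) h2
          · exact absurd (Or.inl rfl) h1
        · have hlast : (((start : Int), (c : Int)) :: r.2.1).getLastD (0, 0)
              = r.2.1.getLastD (0, 0) := getLastD_cons_ne_nil _ _ _ hemp
          have hlen0 : r.2.1.length ≠ 0 := by
            simpa [List.length_eq_zero_iff] using hemp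
          split_ifs at hih with h1 <;> split_ifs with h2
          · rw [List.cons_append, hih]
          · push Not at h2
            rw [hlast] at h2
            rcases h1 with h | h
            · exact absurd h hlen0
            · exact absurd h2.2 h
          · push Not at h1
            rcases h2 with h | h
            · simp at h
            · rw [hlast] at h
              exact absurd h1.2 h
          · rw [hih]

-- ===== VERDICT (by name: the statement is the Claim_ definition above) =====
theorem make_pages_spec : Claim_equal_make_pages := by
  intro il _
  unfold Spec_make_pages make_pages_alt
  have h0 : make_pages il = Afix il 0 := by
    simp only [make_pages, Afix, List.drop_zero, Nat.cast_zero]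
  rw [h0, main_lemma il il.length 0 (by omega) (by omega)]
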